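-- pv_equiv track=rewrite | github.com/justin-curtis-lu/ACC-Scheduler | ACC_scheduler/scheduling_application/methods.py | get_timeframes
-- ===== SOURCE A (Python) =====
-- def format_times(start, end):
--     return str(start) + ":00" + "-" + str(end) + ":00"
--
-- def get_timeframes(list_of_times):
--     start_time = 9
--     end_time = 10
--     formatted_times = []
--     i = 0
--     while i < 5:
--         if list_of_times[i]:
--             if i < 4:
--                 while list_of_times[i + 1]:
--                     end_time += 1
--                     i += 1
--                     if i == 4:
--                         break
--             formatted_times.append(format_times(start_time, end_time))
--             start_time = 9 + (end_time - 10)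
--         i += 1
--         start_time += 1
--         end_time += 1
--     return formatted_times
-- ===== SOURCE B (Python) =====
-- def get_timeframes(list_of_times):
--     slots = [bool(list_of_times[i]) for i in range(5)]
--     return [f"{9 + j}:00-{10 + k}:00"
--             for j in range(5) for k in range(j, 5)
--             if all(slots[j:k + 1])
--             and (j == 0 or not slots[j - 1])
--             and (k == 4 or not slots[k + 1])]
-- ===== Notes on version B (the rewrite author's own statement) =====
-- stated objective: simpler
-- what changed: B abandons A's stateful left-to-right scan with coupled start_time/end_time counters and instead enumerates all 15 candidate intervals (j,k) with 0<=j<=k<5, keeping exactly those that are maximal runs of truthy slots (all slots j..k truthy, no truthy neighbour on either side) and formatting each as f"{9+j}:00-{10+k}:00".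
import Mathlib
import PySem

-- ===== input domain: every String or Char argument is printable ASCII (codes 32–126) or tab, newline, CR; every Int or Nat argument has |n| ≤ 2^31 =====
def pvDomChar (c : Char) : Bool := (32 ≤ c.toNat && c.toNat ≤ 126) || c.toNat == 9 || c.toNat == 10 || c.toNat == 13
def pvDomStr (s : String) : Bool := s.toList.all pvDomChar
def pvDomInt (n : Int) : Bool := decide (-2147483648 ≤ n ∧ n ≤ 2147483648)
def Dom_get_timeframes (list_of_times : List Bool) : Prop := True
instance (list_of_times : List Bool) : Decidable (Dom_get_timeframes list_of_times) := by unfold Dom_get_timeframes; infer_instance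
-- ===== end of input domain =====

-- B replaces A's stateful accumulator scan by enumerating all candidate intervals (j,k) and keeping the maximal truthy runs (objective: simpler); equivalence proved for lists with at least 5 elements (A raises IndexError otherwise).


-- ===== PORT A =====
def format_times (start : Int) (endv : Int) : String :=
  PySem.Int.toStr start ++ ":00" ++ "-" ++ PySem.Int.toStr endv ++ ":00"

-- inner 'while list_of_times[i + 1]: end_time += 1; i += 1; if i == 4: break' (fuel-bounded; fuel 4 suffices)
def pvInnerA (xs : List Bool) : Nat → Nat → Int → Nat × Int
  | 0, i, en => (i, en)
  | fuel + 1, i, en =>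
    if (PySem.List.pyGet? xs ((i : Int) + 1)).getD false then
      if i + 1 = 4 then (i + 1, en + 1) else pvInnerA xs fuel (i + 1) (en + 1)
    else (i, en)

-- outer 'while i < 5' loop (fuel-bounded; fuel 5 suffices since i increases each iteration)
def pvLoopA (xs : List Bool) : Nat → Nat → Int → Int → List String → List String
  | 0, _, _, _, acc => acc
  | fuel + 1, i, st, en, acc =>
    if i < 5 then
      if (PySem.List.pyGet? xs (i : Int)).getD false then
        let p := if i < 4 then pvInnerA xs 4 i en else (i, en)
        let acc' := acc ++ [format_times st p.2]
        let st' := 9 + (p.2 - 10)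
        pvLoopA xs fuel (p.1 + 1) (st' + 1) (p.2 + 1) acc'
      else pvLoopA xs fuel (i + 1) (st + 1) (en + 1) acc
    else acc

def get_timeframes (list_of_times : List Bool) : List String :=
  pvLoopA list_of_times 5 0 9 10 []

-- ===== PORT B =====
-- B: 'slots = [bool(list_of_times[i]) for i in range(5)]', then a comprehension over all
-- interval endpoints j<=k in range(5) keeping the maximal truthy runs.
def get_timeframes_alt (list_of_times : List Bool) : List String :=
  let slots := (PySem.List.pyRange 0 5 1).map
    (fun i => (PySem.List.pyGet? list_of_times i).getD false)
  (PySem.List.pyRange 0 5 1).flatMap (fun j =>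
    (PySem.List.pyRange j 5 1).filterMap (fun k =>
      if (PySem.List.slice slots (some j) (some (k + 1))).all (fun b => b)
          && (decide (j = 0) || !((PySem.List.pyGet? slots (j - 1)).getD false))
          && (decide (k = 4) || !((PySem.List.pyGet? slots (k + 1)).getD false))
      then some (PySem.Int.toStr (9 + j) ++ ":00-" ++ PySem.Int.toStr (10 + k) ++ ":00")
      else none))

-- ===== PRECONDITION & SPEC =====
-- A indexes list_of_times[0..4] unconditionally, so it raises IndexError on lists shorter than 5.
def Pre_get_timeframes (list_of_times : List Bool) : Prop := 5 ≤ list_of_times.length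
instance (list_of_times : List Bool) : Decidable (Pre_get_timeframes list_of_times) := by unfold Pre_get_timeframes; infer_instance
def pvWitness_get_timeframes : List Bool := [true, false, true, true, false]

def Spec_get_timeframes (list_of_times : List Bool) (out : List String) : Prop := out = get_timeframes_alt list_of_times
instance (list_of_times : List Bool) (out : List String) : Decidable (Spec_get_timeframes list_of_times out) := by unfold Spec_get_timeframes; infer_instance

-- ===== CLAIM (what is proved, stated in full; the proofs are below) =====
def Claim_equal_get_timeframes : Prop := ∀ (list_of_times : List Bool), Dom_get_timeframes list_of_times → Pre_get_timeframes list_of_times → Spec_get_timeframes list_of_times (get_timeframes list_of_times)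

-- ===== LEMMAS AND PROOFS =====
-- B's slots list depends only on the first five booleans.
theorem slots_first5 (a b c d e : Bool) (rest : List Bool) :
    (PySem.List.pyRange 0 5 1).map
      (fun i => (PySem.List.pyGet? (a :: b :: c :: d :: e :: rest) i).getD false) = [a, b, c, d, e] := by
  have g0 : (0:Int) ≤ (rest.length:Int) + 1 + 1 + 1 + 1 := by omega
  have g1 : (1:Int) ≤ (rest.length:Int) + 1 + 1 + 1 + 1 := by omega
  have g2 : (2:Int) ≤ (rest.length:Int) + 1 + 1 + 1 + 1 := by omega
  have g3 : (3:Int) ≤ (rest.length:Int) + 1 + 1 + 1 + 1 := by omega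
  have g4 : (4:Int) ≤ (rest.length:Int) + 1 + 1 + 1 + 1 := by omega
  simp [PySem.List.pyRange, PySem.List.pyGet?, PySem.List.pyIdx?, List.range_succ, g0, g1, g2, g3, g4]

-- hence B itself depends only on the first five booleans
theorem alt_first5 (a b c d e : Bool) (rest : List Bool) :
    get_timeframes_alt (a :: b :: c :: d :: e :: rest) = get_timeframes_alt [a, b, c, d, e] := by
  simp only [get_timeframes_alt]
  rw [slots_first5, slots_first5]

-- A reads only indices 0..4: with the first five booleans fixed, both sides reduce.
set_option maxHeartbeats 3200000 in
theorem gt_eq_first5 (a b c d e : Bool) (rest : List Bool) :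
    get_timeframes (a :: b :: c :: d :: e :: rest) =
      get_timeframes_alt (a :: b :: c :: d :: e :: rest) := by
  have h3 : (0:Int) ≤ (rest.length:Int) + 1 + 1 + 1 := by omega
  have h4 : (0:Int) ≤ (rest.length:Int) + 1 + 1 + 1 + 1 := by omega
  have g1 : (1:Int) ≤ (rest.length:Int) + 1 + 1 + 1 + 1 := by omega
  have g2 : (2:Int) ≤ (rest.length:Int) + 1 + 1 + 1 + 1 := by omega
  have g3 : (3:Int) ≤ (rest.length:Int) + 1 + 1 + 1 + 1 := by omega
  have g4 : (4:Int) ≤ (rest.length:Int) + 1 + 1 + 1 + 1 := by omega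
  cases a <;> cases b <;> cases c <;> cases d <;> cases e <;>
    rw [alt_first5] <;>
    simp [h3, h4, g1, g2, g3, g4,
      get_timeframes, pvLoopA, pvInnerA, format_times,
      PySem.List.pyGet?, PySem.List.pyIdx?] <;>
    decide

-- ===== VERDICT (by name: the statement is the Claim_ definition above) =====
theorem get_timeframes_spec : Claim_equal_get_timeframes := by
  intro xs _ hpre
  match xs, hpre with
  | a :: b :: c :: d :: e :: rest, _ => exact gt_eq_first5 a b c d e rest
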